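-- pv_equiv track=rewrite | github.com/HiromasaYamanishi/LLaVATour | llava/model/multimodal_encoder/entity_encoder.py | convert_to_sequential_with_reset
-- ===== SOURCE A (Python) =====
-- def convert_to_sequential_with_reset(sequence, prompt_change_positions):
--     value_to_seq = {}
--     current_seq = -1
--     result = []
--     last_value = None
--
--     for i, value in enumerate(sequence):
--         if value != last_value or i in prompt_change_positions:
--             # 値が変わったら、または新しいプロンプトの開始位置の場合は連番をリセット
--             current_seq += 1
--             value_to_seq[value] = current_seq
--
--         result.append(value_to_seq[value])
--         last_value = value
--
--     return result
-- ===== SOURCE B (Python) =====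
-- def convert_to_sequential_with_reset(sequence, prompt_change_positions):
--     # build 0/1 reset flags, then prefix-sum them (ids = cumulative resets - 1)
--     flags = []
--     prev = None
--     for i, value in enumerate(sequence):
--         flags.append(1 if value != prev or i in prompt_change_positions else 0)
--         prev = value
--     result = []
--     total = 0
--     for f in flags:
--         total += f
--         result.append(total - 1)
--     return result
-- ===== Notes on version B (the rewrite author's own statement) =====
-- stated objective: alternative
-- what changed: The value->seq dict is dropped entirely: B builds a table of 0/1 reset flags in one pass and produces the ids as a prefix sum (cumulative reset count minus 1), instead of A's interleaved loop maintaining a dict, a counter and a last value.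
import Mathlib
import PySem

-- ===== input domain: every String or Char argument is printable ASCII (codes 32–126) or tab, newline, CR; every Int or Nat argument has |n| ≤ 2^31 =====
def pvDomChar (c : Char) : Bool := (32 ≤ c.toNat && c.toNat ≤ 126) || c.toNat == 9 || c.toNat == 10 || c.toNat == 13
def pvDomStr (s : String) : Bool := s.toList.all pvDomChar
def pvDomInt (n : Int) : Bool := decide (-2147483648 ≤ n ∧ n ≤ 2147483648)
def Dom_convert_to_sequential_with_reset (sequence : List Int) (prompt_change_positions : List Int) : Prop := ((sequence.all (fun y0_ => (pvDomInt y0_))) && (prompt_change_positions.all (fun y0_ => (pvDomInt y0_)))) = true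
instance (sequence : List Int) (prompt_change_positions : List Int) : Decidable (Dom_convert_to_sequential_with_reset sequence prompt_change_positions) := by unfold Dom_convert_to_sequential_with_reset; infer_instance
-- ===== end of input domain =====

-- B drops A's value->seq dict: it builds a table of 0/1 reset flags and emits the prefix sums minus 1 (objective: alternative).

-- ===== PORT A =====
-- A's loop: state = (value_to_seq dict, current_seq, last_value); result built element by element.
-- `value_to_seq[value]` is ported as getD _ 0: the key is always present when read (set on every reset,
-- and otherwise value == last_value whose entry is current), so Python never raises KeyError here.
def pvLoopA (pcp : List Int) : List Int → Int → PySem.Dict Int Int → Int → Option Int → List Int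
  | [], _, _, _, _ => []
  | v :: rest, i, d, cur, last =>
    if some v ≠ last ∨ i ∈ pcp then
      ((d.insert v (cur + 1)).getD v 0) :: pvLoopA pcp rest (i + 1) (d.insert v (cur + 1)) (cur + 1) (some v)
    else
      (d.getD v 0) :: pvLoopA pcp rest (i + 1) d cur (some v)

def convert_to_sequential_with_reset (sequence : List Int) (prompt_change_positions : List Int) : List Int :=
  pvLoopA prompt_change_positions sequence 0 PySem.Dict.empty (-1) none

-- ===== PORT B =====
-- first pass: 0/1 reset flags (prev starts as none, so index 0 always flags unless… it always flags on ints ≠ none)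
def pvFlagsB (pcp : List Int) : List Int → Int → Option Int → List Int
  | [], _, _ => []
  | v :: rest, i, prev => (if some v ≠ prev ∨ i ∈ pcp then (1 : Int) else 0) :: pvFlagsB pcp rest (i + 1) (some v)

-- second pass: running prefix sum, each id = total - 1
def pvPrefixB : List Int → Int → List Int
  | [], _ => []
  | f :: rest, t => (t + f - 1) :: pvPrefixB rest (t + f)

def convert_to_sequential_with_reset_alt (sequence : List Int) (prompt_change_positions : List Int) : List Int :=
  pvPrefixB (pvFlagsB prompt_change_positions sequence 0 none) 0

-- ===== PRECONDITION & SPEC =====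
def Spec_convert_to_sequential_with_reset (sequence : List Int) (prompt_change_positions : List Int) (out : List Int) : Prop := out = convert_to_sequential_with_reset_alt sequence prompt_change_positions
instance (sequence : List Int) (prompt_change_positions : List Int) (out : List Int) : Decidable (Spec_convert_to_sequential_with_reset sequence prompt_change_positions out) := by unfold Spec_convert_to_sequential_with_reset; infer_instance

-- ===== CLAIM (what is proved, stated in full; the proofs are below) =====
def Claim_equal_convert_to_sequential_with_reset : Prop := ∀ (sequence : List Int) (prompt_change_positions : List Int), Dom_convert_to_sequential_with_reset sequence prompt_change_positions → Spec_convert_to_sequential_with_reset sequence prompt_change_positions (convert_to_sequential_with_reset sequence prompt_change_positions)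

-- ===== LEMMAS AND PROOFS =====
-- Invariant: if last = some v then the dict maps v to cur; then A's loop emits exactly
-- the prefix sums (starting at cur+1) of B's flag list minus 1.
theorem pvLoopA_eq (pcp : List Int) : ∀ (seq : List Int) (i : Int) (d : PySem.Dict Int Int) (cur : Int) (last : Option Int),
    (∀ v, last = some v → d.getD v 0 = cur) →
    pvLoopA pcp seq i d cur last = pvPrefixB (pvFlagsB pcp seq i last) (cur + 1) := by
  intro seq
  induction seq with
  | nil => intro i d cur last _; simp [pvLoopA, pvFlagsB, pvPrefixB]
  | cons v rest ih =>
    intro i d cur last hinv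
    by_cases hc : some v ≠ last ∨ i ∈ pcp
    · simp only [pvLoopA, pvFlagsB, pvPrefixB, if_pos hc]
      congr 1
      · rw [PySem.Dict.getD_insert_self]; ring
      · rw [ih (i + 1) (d.insert v (cur + 1)) (cur + 1) (some v)
            (by intro w hw; cases hw; exact PySem.Dict.getD_insert_self _ _ _ _)]
    · obtain ⟨h1, _⟩ := not_or.mp hc
      have hlast : last = some v := (not_ne_iff.mp h1).symm
      simp only [pvLoopA, pvFlagsB, pvPrefixB, if_neg hc]
      congr 1
      · rw [hinv v hlast]; ring
      · rw [show cur + 1 + (0 : Int) = cur + 1 by ring,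
            ih (i + 1) d cur (some v) (by intro w hw; cases hw; exact hinv v hlast)]

-- ===== VERDICT (by name: the statement is the Claim_ definition above) =====
theorem convert_to_sequential_with_reset_spec : Claim_equal_convert_to_sequential_with_reset := by
  intro seq pcp _
  unfold Spec_convert_to_sequential_with_reset convert_to_sequential_with_reset convert_to_sequential_with_reset_alt
  rw [pvLoopA_eq pcp seq 0 PySem.Dict.empty (-1) none (by intro v h; cases h)]
  norm_num
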